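-- pv_equiv track=rewrite | github.com/hlohaangit/GazeDetection | src/analytics_writer/analytics_writer.py | _calculate_peak_hours
-- ===== SOURCE A (Python) =====
-- from typing import Dict, List, Tuple, Optional, Any
-- from collections import defaultdict
--
-- def _calculate_peak_hours(sessions: List[Any]) -> List[Tuple[int, int]]:
--     """Calculate peak hours from sessions."""
--     # This is a simplified implementation
--     # In practice, you'd use actual timestamps
--     hour_counts = defaultdict(int)
--
--     for i, session in enumerate(sessions):
--         # Simulate hour based on session index
--         hour = (9 + i) % 24  # Assuming starting at 9 AM
--         hour_counts[hour] += 1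
--
--     # Sort by count and return top 5
--     sorted_hours = sorted(hour_counts.items(),
--                         key=lambda x: x[1],
--                         reverse=True)
--     return sorted_hours[:5]
-- ===== SOURCE B (Python) =====
-- def _calculate_peak_hours(sessions):
--     """Closed-form: hour (9+i)%24 repeats with period 24, so counts depend only on len(sessions)."""
--     n = len(sessions)
--     q, r = divmod(n, 24)
--     order = [(9 + i) % 24 for i in range(min(n, 24))]
--     result = [(h, q + 1) for h in order[:r]] + [(h, q) for h in order[r:]]
--     return result[:5]
-- ===== Notes on version B (the rewrite author's own statement) =====
-- stated objective: faster
-- what changed: Replaces the per-session counting loop and the sort with a closed form: counts depend only on len(sessions), each hour gets n//24 with +1 for the first n%24 hours in insertion order, which is already the stable descending order A's sort produces.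
import Mathlib
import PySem

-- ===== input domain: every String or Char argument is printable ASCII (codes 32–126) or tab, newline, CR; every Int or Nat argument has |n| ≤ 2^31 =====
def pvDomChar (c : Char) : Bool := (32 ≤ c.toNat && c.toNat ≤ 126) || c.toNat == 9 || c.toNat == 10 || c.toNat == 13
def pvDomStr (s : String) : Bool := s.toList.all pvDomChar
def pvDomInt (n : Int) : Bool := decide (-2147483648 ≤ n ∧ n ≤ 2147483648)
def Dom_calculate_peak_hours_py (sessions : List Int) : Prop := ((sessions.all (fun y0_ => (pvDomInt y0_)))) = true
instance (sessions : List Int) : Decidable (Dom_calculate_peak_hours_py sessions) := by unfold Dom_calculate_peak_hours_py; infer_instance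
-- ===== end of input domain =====

-- B replaces A's per-session counting loop and sort with closed-form counts from len(sessions) (return value only; A has no side effects).

-- ===== PORT A =====
def calculate_peak_hours_py (sessions : List Int) : List (Int × Int) :=
  let hour_counts : PySem.Dict Int Int :=
    (PySem.List.enumerate sessions 0).foldl
      (fun d p => d.modify (PySem.Int.mod (9 + p.1) 24) 0 (· + 1)) PySem.Dict.empty
  let sorted_hours := PySem.List.sorted hour_counts.items (fun x => x.2) true
  PySem.List.slice sorted_hours none (some 5)

-- ===== PORT B =====
def calculate_peak_hours_py_alt (sessions : List Int) : List (Int × Int) :=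
  let n : Int := (sessions.length : Int)
  let q : Int := PySem.Int.floordiv n 24
  let r : Int := PySem.Int.mod n 24
  let order : List Int := (PySem.List.pyRange 0 (min n 24) 1).map (fun i => PySem.Int.mod (9 + i) 24)
  let result : List (Int × Int) :=
    (PySem.List.slice order none (some r)).map (fun h => (h, q + 1)) ++
    (PySem.List.slice order (some r) none).map (fun h => (h, q))
  PySem.List.slice result none (some 5)

-- ===== PRECONDITION & SPEC =====
def Spec_calculate_peak_hours_py (sessions : List Int) (out : List (Int × Int)) : Prop := out = calculate_peak_hours_py_alt sessions
instance (sessions : List Int) (out : List (Int × Int)) : Decidable (Spec_calculate_peak_hours_py sessions out) := by unfold Spec_calculate_peak_hours_py; infer_instance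

-- ===== CLAIM (what is proved, stated in full; the proofs are below) =====
def Claim_equal_calculate_peak_hours_py : Prop := ∀ (sessions : List Int), Dom_calculate_peak_hours_py sessions → Spec_calculate_peak_hours_py sessions (calculate_peak_hours_py sessions)

-- ===== LEMMAS AND PROOFS =====

-- the hour assigned to session index k
def pvHour (k : Nat) : Int := (((9 + k) % 24 : Nat) : Int)

-- common normal form of both programs, as a function of n = len(sessions)
def pvNF (n : Nat) : List (Int × Int) :=
  ((List.range (min n 24)).map
    (fun i => (pvHour i, ((n / 24 : Nat) : Int) + if i < n % 24 then 1 else 0))).take 5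

theorem hmod (k : Nat) : PySem.Int.mod (9 + (k:Int)) 24 = pvHour k := by
  rw [PySem.Int.mod_eq_emod_of_pos (by norm_num)]; unfold pvHour; omega

theorem pvHour_inj {a b : Nat} (ha : a < 24) (hb : b < 24) (h : pvHour a = pvHour b) : a = b := by
  unfold pvHour at h
  have := Int.ofNat.inj h
  omega

theorem pvHour_mod (n : Nat) : pvHour n = pvHour (n % 24) := by
  unfold pvHour; congr 1; omega

theorem pvHour_iff {n i : Nat} (hi : i < 24) : pvHour n = pvHour i ↔ n % 24 = i := by
  constructor
  · intro he
    exact pvHour_inj (Nat.mod_lt n (by omega)) hi (by rw [← pvHour_mod, he])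
  · intro h; rw [pvHour_mod, h]

-- the distinct hours, in first-insertion order, are the first min(n,24) hours
theorem ofList_hours : ∀ n, PySem.Set.ofList ((List.range n).map pvHour)
    = (List.range (min n 24)).map pvHour := by
  intro n
  induction n with
  | zero => simp
  | succ n ih =>
    rw [List.range_succ, List.map_append, PySem.Set.ofList_eq_foldl, List.foldl_append,
        ← PySem.Set.ofList_eq_foldl, ih]
    simp only [List.map_cons, List.map_nil, List.foldl_cons, List.foldl_nil]
    by_cases h : n < 24
    · rw [min_eq_left (by omega), min_eq_left (by omega), List.range_succ, List.map_append,
          List.map_cons, List.map_nil]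
      refine PySem.Set.add_of_not_mem (fun hmem => ?_)
      obtain ⟨a, ha, hae⟩ := List.mem_map.mp hmem
      simp only [List.mem_range] at ha
      have := pvHour_inj (by omega) h hae
      omega
    · rw [min_eq_right (by omega), min_eq_right (by omega)]
      exact PySem.Set.add_of_mem
        (List.mem_map.mpr ⟨n % 24, List.mem_range.mpr (by omega), (pvHour_mod n).symm⟩)

-- hour i occurs n/24 times, plus once more iff i < n%24
theorem cnt (i : Nat) (hi : i < 24) : ∀ n, ((List.range n).map pvHour).count (pvHour i)
    = n / 24 + if i < n % 24 then 1 else 0 := by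
  intro n
  induction n with
  | zero => simp
  | succ n ih =>
    rw [List.range_succ, List.map_append, List.count_append, ih]
    simp only [List.map_cons, List.map_nil, List.count_cons, List.count_nil, beq_iff_eq,
      propext (pvHour_iff hi)]
    split_ifs <;> omega

theorem pvA_eq_NF (sessions : List Int) : calculate_peak_hours_py sessions = pvNF sessions.length := by
  simp only [calculate_peak_hours_py, pvNF]
  set L := sessions.length with hL
  have hhl : (PySem.List.enumerate sessions 0).map (fun p => PySem.Int.mod (9 + p.1) 24)
      = (List.range L).map pvHour := by
    have : (fun p : Int × Int => PySem.Int.mod (9 + p.1) 24)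
        = (fun i => PySem.Int.mod (9 + i) 24) ∘ (fun p : Int × Int => p.1) := rfl
    rw [this, ← List.map_map, PySem.List.map_fst_enumerate]
    simp only [zero_add, ← hL]
    rw [PySem.List.pyRange_zero_natCast, List.map_map]
    exact List.map_congr_left (fun k _ => hmod k)
  have h1 : (PySem.List.enumerate sessions 0).foldl
      (fun d p => d.modify (PySem.Int.mod (9 + p.1) 24) 0 (· + 1)) PySem.Dict.empty
      = PySem.Dict.counter ((List.range L).map pvHour) := by
    rw [PySem.Dict.counter_eq_foldl, ← hhl, List.foldl_map]
  rw [h1, PySem.Dict.items_counter, ofList_hours]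
  have h2 : ((List.range (min L 24)).map pvHour).map
        (fun k => (k, (((List.range L).map pvHour).count k : Int)))
      = (List.range (min L 24)).map
        (fun i => (pvHour i, ((L / 24 : Nat) : Int) + if i < L % 24 then 1 else 0)) := by
    rw [List.map_map]
    refine List.map_congr_left (fun i hi => ?_)
    simp only [List.mem_range] at hi
    have hi24 : i < 24 := lt_of_lt_of_le hi (min_le_right _ _)
    simp only [Function.comp]
    rw [cnt i hi24 L]
    split_ifs <;> simp
  rw [h2]
  have h3 : PySem.List.sorted ((List.range (min L 24)).map
        (fun i => (pvHour i, ((L / 24 : Nat) : Int) + if i < L % 24 then 1 else 0)))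
        (fun x => x.2) true
      = (List.range (min L 24)).map
        (fun i => (pvHour i, ((L / 24 : Nat) : Int) + if i < L % 24 then 1 else 0)) := by
    apply PySem.List.sorted_rev_eq_self_of_pairwise
    rw [List.pairwise_map]
    refine (List.pairwise_lt_range).imp (fun {a b} hab => ?_)
    simp only
    split_ifs <;> omega
  rw [h3]
  exact_mod_cast PySem.List.slice_to_natCast _ 5

theorem pvB_eq_NF (sessions : List Int) : calculate_peak_hours_py_alt sessions = pvNF sessions.length := by
  simp only [calculate_peak_hours_py_alt, pvNF]
  set L := sessions.length with hL
  set m := min L 24 with hm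
  set r := L % 24 with hr
  set q := L / 24 with hq
  have hrm : r ≤ m := by omega
  have e1 : PySem.Int.floordiv (L:Int) 24 = (q:Int) := by exact_mod_cast PySem.Int.floordiv_natCast L 24
  have e2 : PySem.Int.mod (L:Int) 24 = (r:Int) := by exact_mod_cast PySem.Int.mod_natCast L 24
  have e3 : min ((L:Nat):Int) 24 = ((m:Nat):Int) := by omega
  rw [e1, e2, e3, PySem.List.pyRange_zero_natCast, List.map_map]
  have e4 : (List.range m).map ((fun i => PySem.Int.mod (9 + i) 24) ∘ (fun k : Nat => (k:Int)))
      = (List.range m).map pvHour := by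
    refine List.map_congr_left (fun k _ => ?_)
    simpa using hmod k
  rw [e4, PySem.List.slice_to_natCast, PySem.List.slice_from_natCast]
  have e5 : ∀ xs : List (Int×Int), PySem.List.slice xs none (some 5) = xs.take 5 := by
    intro xs; exact_mod_cast PySem.List.slice_to_natCast xs 5
  rw [e5]
  congr 1
  have hsplit : List.range m = List.range r ++ (List.range (m - r)).map (r + ·) := by
    rw [← List.range_add]; congr 1; omega
  rw [hsplit]
  rw [List.map_append, List.take_left' (by simp [hrm]), List.drop_left' (by simp [hrm]),
      List.map_append]
  simp only [List.map_map]
  congr 1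
  · refine List.map_congr_left (fun k hk => ?_)
    simp only [List.mem_range] at hk
    simp [hk]
  · refine List.map_congr_left (fun k hk => ?_)
    simp [Function.comp]

-- ===== VERDICT (by name: the statement is the Claim_ definition above) =====
theorem calculate_peak_hours_py_spec : Claim_equal_calculate_peak_hours_py := by
  intro sessions _
  unfold Spec_calculate_peak_hours_py
  rw [pvA_eq_NF, pvB_eq_NF]
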